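-- pv_equiv track=rewrite | github.com/JefeLitman/Oil-Wells-Analogies | main.py | ordenar_texto_indices
-- ===== SOURCE A (Python) =====
-- def ordenar_texto_indices(texto): #Funcion que se encarga de ordenar bonito los numerales como 1) o A.
--     indicador=[41,46]
--     letras=list(range(65,91))
--     numeros=list(range(48,58))
--     memoria=0
--     i=2
--     while(i<len(texto)):
--         if(memoria):
--             if(ord(texto[i]) in indicador):
--                 mit1=texto[0:i-1]
--                 mit2=texto[i-1:len(texto)+1]
--                 texto=mit1+"\n"+mit2
--                 memoria=0
--             else:
--                 memoria=0
--         else: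
--             if(ord(texto[i]) in letras or ord(texto[i]) in numeros):
--                 memoria=1
--         i = i + 1
--     return texto
-- ===== SOURCE B (Python) =====
-- def ordenar_texto_indices(texto):  # single forward pass building pieces, instead of A's per-insertion full-string rebuild
--     pieces = []
--     memoria = False
--     for i, c in enumerate(texto):
--         if i >= 2:
--             if memoria:
--                 memoria = False
--                 if c in ').':
--                     pieces[-1] = '\n' + pieces[-1]
--             elif 'A' <= c <= 'Z' or '0' <= c <= '9':
--                 memoria = True
--         pieces.append(c)
--     return ''.join(pieces)
-- ===== Notes on version B (the rewrite author's own statement) =====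
-- stated objective: faster
-- what changed: B makes a single forward pass that appends one piece per character and prepends ' ' to the previous piece when an indicator follows, instead of A's scanner that rebuilds the whole string with slicing and concatenation at every insertion.
import Mathlib
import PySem

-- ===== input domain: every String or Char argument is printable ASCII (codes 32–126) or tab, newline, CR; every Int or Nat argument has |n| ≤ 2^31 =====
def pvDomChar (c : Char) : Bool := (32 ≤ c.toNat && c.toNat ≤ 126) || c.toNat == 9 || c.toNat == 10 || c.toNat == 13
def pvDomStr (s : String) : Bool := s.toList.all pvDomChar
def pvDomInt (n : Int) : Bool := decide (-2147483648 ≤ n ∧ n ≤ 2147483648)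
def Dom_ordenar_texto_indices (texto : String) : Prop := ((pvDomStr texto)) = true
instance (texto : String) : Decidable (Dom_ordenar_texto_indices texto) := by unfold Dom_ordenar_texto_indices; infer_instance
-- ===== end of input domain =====

-- B replaces A's stateful scanner that rebuilds the whole string on every insertion by a
-- single forward pass that appends pieces and prepends '\n' to the previous piece when needed.

-- ===== PORT A =====
-- indicador = [41,46]; letras = list(range(65,91)); numeros = list(range(48,58))
def pvIndicador : List Int := [41, 46]
def pvLetras : List Int := PySem.List.pyRange 65 91 1
def pvNumeros : List Int := PySem.List.pyRange 48 58 1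

-- the while loop of A, on texto.toList; i only grows, texto gains one char per insertion.
-- texto[0:i-1] / texto[i-1:len+1] are take/drop since 0 ≤ i-1 here (i starts at 2, only grows).
def pvALoop (texto : List Char) (memoria : Bool) (i : Nat) : List Char :=
  if h : i < texto.length then
    if memoria then
      if pvIndicador.contains ((texto[i].toNat : Int)) then
        pvALoop (texto.take (i - 1) ++ '\n' :: texto.drop (i - 1)) false (i + 1)
      else
        pvALoop texto false (i + 1)
    else
      if pvLetras.contains ((texto[i].toNat : Int)) || pvNumeros.contains ((texto[i].toNat : Int)) then
        pvALoop texto true (i + 1)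
      else
        pvALoop texto false (i + 1)
  else texto
termination_by 2 * (texto.length - i) + (if memoria then 1 else 0)
decreasing_by all_goals (simp_all; try omega)

def ordenar_texto_indices (texto : String) : String :=
  String.mk (pvALoop texto.toList false 2)

-- ===== PORT B =====
-- the for loop of Source B: pieces is a list of strings (here List (List Char));
-- pieces[-1] = '\n' + pieces[-1] becomes dropLast ++ [modified last]; pieces.append(c) is ++ [[c]].
def pvBLoop (cs : List Char) (i : Nat) (memoria : Bool) (pieces : List (List Char)) : List (List Char) :=
  match cs with
  | [] => pieces
  | c :: rs =>
    if 2 ≤ i then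
      if memoria then
        let pieces' := if c = ')' ∨ c = '.' then pieces.dropLast ++ ['\n' :: pieces.getLast!] else pieces
        pvBLoop rs (i + 1) false (pieces' ++ [[c]])
      else if ('A' ≤ c ∧ c ≤ 'Z') ∨ ('0' ≤ c ∧ c ≤ '9') then
        pvBLoop rs (i + 1) true (pieces ++ [[c]])
      else
        pvBLoop rs (i + 1) false (pieces ++ [[c]])
    else
      pvBLoop rs (i + 1) memoria (pieces ++ [[c]])

def ordenar_texto_indices_alt (texto : String) : String :=
  String.mk (pvBLoop texto.toList 0 false []).flatten

-- ===== PRECONDITION & SPEC =====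
def Spec_ordenar_texto_indices (texto : String) (out : String) : Prop := out = ordenar_texto_indices_alt texto
instance (texto : String) (out : String) : Decidable (Spec_ordenar_texto_indices texto out) := by unfold Spec_ordenar_texto_indices; infer_instance

-- ===== CLAIM (what is proved, stated in full; the proofs are below) =====
def Claim_equal_ordenar_texto_indices : Prop := ∀ (texto : String), Dom_ordenar_texto_indices texto → Spec_ordenar_texto_indices texto (ordenar_texto_indices texto)

-- ===== LEMMAS AND PROOFS =====

-- the common pure scanner both loops compute: prev is texto[i-1], rest is texto[i:]
def pvScan (rest : List Char) (memoria : Bool) (prev : Char) : List Char :=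
  match rest with
  | [] => [prev]
  | c :: rs =>
    if memoria then
      if c = ')' ∨ c = '.' then '\n' :: pvScan (c :: rs) false prev
      else prev :: pvScan rs false c
    else if ('A' ≤ c ∧ c ≤ 'Z') ∨ ('0' ≤ c ∧ c ≤ '9') then prev :: pvScan rs true c
    else prev :: pvScan rs false c
termination_by 2 * rest.length + (if memoria then 1 else 0)

lemma pvChar_le_iff (c d : Char) : c ≤ d ↔ c.toNat ≤ d.toNat := by
  rw [Char.le_def, UInt32.le_iff_toNat_le]; rfl

lemma pvToNat41 (c : Char) : c.toNat = 41 ↔ c = ')' := eq_iff_eq_of_cmp_eq_cmp rfl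
lemma pvToNat46 (c : Char) : c.toNat = 46 ↔ c = '.' := eq_iff_eq_of_cmp_eq_cmp rfl

lemma pvInd_iff (c : Char) : pvIndicador.contains ((c.toNat : Int)) = true ↔ (c = ')' ∨ c = '.') := by
  simp only [pvIndicador, List.contains_eq_mem, List.mem_cons,
    decide_eq_true_eq, List.not_mem_nil, or_false]
  rw [← pvToNat41, ← pvToNat46]
  omega

lemma pvAlnum_iff (c : Char) :
    (pvLetras.contains ((c.toNat : Int)) || pvNumeros.contains ((c.toNat : Int))) = true ↔
    (('A' ≤ c ∧ c ≤ 'Z') ∨ ('0' ≤ c ∧ c ≤ '9')) := by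
  simp only [pvLetras, pvNumeros, Bool.or_eq_true, List.contains_eq_mem, decide_eq_true_eq,
    PySem.List.mem_pyRange_one]
  rw [pvChar_le_iff 'A' c, pvChar_le_iff c 'Z', pvChar_le_iff '0' c, pvChar_le_iff c '9']
  show ((65:Int) ≤ _ ∧ _ < 91) ∨ ((48:Int) ≤ _ ∧ _ < 58) ↔ (65 ≤ c.toNat ∧ c.toNat ≤ 90) ∨ (48 ≤ c.toNat ∧ c.toNat ≤ 57)
  omega

lemma pvInd_not_alnum {c : Char} (h : c = ')' ∨ c = '.') :
    ¬ (('A' ≤ c ∧ c ≤ 'Z') ∨ ('0' ≤ c ∧ c ≤ '9')) := by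
  rcases h with h | h <;> subst h <;> decide

lemma pvALoop_eq_scan (rest : List Char) :
    ∀ (memoria : Bool) (done : List Char) (prev : Char),
    pvALoop (done ++ prev :: rest) memoria (done.length + 1) = done ++ pvScan rest memoria prev := by
  induction rest with
  | nil =>
    intro memoria done prev
    simp [pvALoop, pvScan]
  | cons c rs ih =>
    intro memoria done prev
    have hlen : done.length + 1 < (done ++ prev :: c :: rs).length := by simp
    have hget : (done ++ prev :: c :: rs)[done.length + 1]'hlen = c := by
      rw [List.getElem_append_right (by omega)]
      simp
    have htake : (done ++ prev :: c :: rs).take (done.length + 1 - 1) = done := by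
      simp
    have hdrop : (done ++ prev :: c :: rs).drop (done.length + 1 - 1) = prev :: c :: rs := by
      simp
    rw [pvALoop]
    rw [dif_pos hlen]
    simp only [hget, htake, hdrop]
    cases memoria with
    | true =>
      by_cases hc : pvIndicador.contains ((c.toNat : Int)) = true
      · rw [if_pos rfl, if_pos hc]
        have hc' := (pvInd_iff c).mp hc
        -- the rebuilt string is (done ++ ['\n']) ++ prev :: c :: rs; unfold one more A-step
        have hform : done ++ '\n' :: prev :: c :: rs = (done ++ ['\n']) ++ prev :: c :: rs := by simp
        have hlen2 : done.length + 1 + 1 = (done ++ ['\n']).length + 1 := by simp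
        rw [hform, hlen2]
        have hlen3 : (done ++ ['\n']).length + 1 < ((done ++ ['\n']) ++ prev :: c :: rs).length := by
          simp only [List.length_append, List.length_cons, List.length_nil]
          omega
        have hget3 : ((done ++ ['\n']) ++ prev :: c :: rs)[(done ++ ['\n']).length + 1]'hlen3 = c := by
          rw [List.getElem_append_right (by simp)]
          simp
        rw [pvALoop, dif_pos hlen3]
        simp only [hget3, Bool.false_eq_true]
        have hna : ¬ (pvLetras.contains ((c.toNat : Int)) || pvNumeros.contains ((c.toNat : Int))) = true := by
          intro hx
          exact pvInd_not_alnum hc' ((pvAlnum_iff c).mp hx)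
        rw [if_neg hna]
        have hform2 : (done ++ ['\n']) ++ prev :: c :: rs = ((done ++ ['\n', prev]) ++ c :: rs) := by simp
        have hlen4 : (done ++ ['\n']).length + 1 + 1 = (done ++ ['\n', prev]).length + 1 := by simp
        rw [hform2, hlen4, ih false (done ++ ['\n', prev]) c]
        rw [pvScan, if_pos rfl, if_pos hc', pvScan, if_neg (by simp), if_neg (pvInd_not_alnum hc')]
        simp
      · rw [if_pos rfl, if_neg hc]
        have hform : done ++ prev :: c :: rs = (done ++ [prev]) ++ c :: rs := by simp
        have hlen2 : done.length + 1 + 1 = (done ++ [prev]).length + 1 := by simp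
        rw [hform, hlen2, ih false (done ++ [prev]) c]
        have hc' : ¬ (c = ')' ∨ c = '.') := fun hx => hc ((pvInd_iff c).mpr hx)
        rw [pvScan, if_pos rfl, if_neg hc']
        simp
    | false =>
      have hform : done ++ prev :: c :: rs = (done ++ [prev]) ++ c :: rs := by simp
      have hlen2 : done.length + 1 + 1 = (done ++ [prev]).length + 1 := by simp
      by_cases hal : (pvLetras.contains ((c.toNat : Int)) || pvNumeros.contains ((c.toNat : Int))) = true
      · rw [if_neg (by simp), if_pos hal, hform, hlen2, ih true (done ++ [prev]) c]
        rw [pvScan, if_neg (by simp), if_pos ((pvAlnum_iff c).mp hal)]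
        simp
      · rw [if_neg (by simp), if_neg hal, hform, hlen2, ih false (done ++ [prev]) c]
        have hal' : ¬ (('A' ≤ c ∧ c ≤ 'Z') ∨ ('0' ≤ c ∧ c ≤ '9')) := fun hx => hal ((pvAlnum_iff c).mpr hx)
        rw [pvScan, if_neg (by simp), if_neg hal']
        simp

lemma pvGetLastBang_concat {α : Type} [Inhabited α] (l : List α) (x : α) : (l ++ [x]).getLast! = x := by
  induction l with
  | nil => rfl
  | cons a t ih =>
    cases t with
    | nil => rfl
    | cons b u => simpa [List.getLast!] using ih

lemma pvBLoop_eq_scan (cs : List Char) :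
    ∀ (i : Nat) (memoria : Bool) (front : List (List Char)) (prev : Char), 2 ≤ i →
    (pvBLoop cs i memoria (front ++ [[prev]])).flatten = front.flatten ++ pvScan cs memoria prev := by
  induction cs with
  | nil =>
    intro i memoria front prev _
    simp [pvBLoop, pvScan]
  | cons c rs ih =>
    intro i memoria front prev hi
    rw [pvBLoop, if_pos hi]
    cases memoria with
    | true =>
      rw [if_pos rfl]
      by_cases hc : c = ')' ∨ c = '.'
      · rw [if_pos hc]
        have hdl : (front ++ [[prev]]).dropLast = front := by simp
        have hgl : (front ++ [[prev]]).getLast! = [prev] := pvGetLastBang_concat front [prev]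
        rw [hdl, hgl]
        show (pvBLoop rs (i + 1) false ((front ++ [['\n', prev]]) ++ [[c]])).flatten =
          front.flatten ++ pvScan (c :: rs) true prev
        rw [ih (i + 1) false (front ++ [['\n', prev]]) c (by omega)]
        rw [pvScan, if_pos rfl, if_pos hc, pvScan, if_neg (by simp), if_neg (pvInd_not_alnum hc)]
        simp
      · rw [if_neg hc]
        rw [ih (i + 1) false (front ++ [[prev]]) c (by omega)]
        rw [pvScan, if_pos rfl, if_neg hc]
        simp
    | false =>
      by_cases hal : ('A' ≤ c ∧ c ≤ 'Z') ∨ ('0' ≤ c ∧ c ≤ '9')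
      · rw [if_neg (by simp), if_pos hal, ih (i + 1) true (front ++ [[prev]]) c (by omega)]
        rw [pvScan, if_neg (by simp), if_pos hal]
        simp
      · rw [if_neg (by simp), if_neg hal, ih (i + 1) false (front ++ [[prev]]) c (by omega)]
        rw [pvScan, if_neg (by simp), if_neg hal]
        simp

-- ===== VERDICT (by name: the statement is the Claim_ definition above) =====
theorem ordenar_texto_indices_spec : Claim_equal_ordenar_texto_indices := by
  intro texto _
  unfold Spec_ordenar_texto_indices ordenar_texto_indices ordenar_texto_indices_alt
  match h : texto.toList with
  | [] => rw [pvALoop]; simp [pvBLoop]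
  | [a] =>
    rw [pvALoop]
    simp [pvBLoop]
  | a :: b :: rest =>
    have hA : pvALoop (a :: b :: rest) false 2 = [a] ++ pvScan rest false b := by
      have := pvALoop_eq_scan rest false [a] b
      simpa using this
    have hB : (pvBLoop (a :: b :: rest) 0 false []).flatten = [a] ++ pvScan rest false b := by
      rw [pvBLoop]
      simp only [if_neg (by omega : ¬ 2 ≤ 0)]
      rw [pvBLoop]
      simp only [if_neg (by omega : ¬ 2 ≤ 1)]
      simpa using pvBLoop_eq_scan rest 2 false [[a]] b (by omega)
    rw [hA, hB]
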